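-- pv_equiv track=rewrite | github.com/NicolaDes/turingarenaExamples | sat_to_3sat/callbacks/core/generator.py | isSat
-- ===== SOURCE A (Python) =====
-- def isSat(formula, certificate):
--     sat = True
--     for c in formula:
--         c_sat = False
--         for l in c:
--             if l in certificate:
--                 c_sat=True
--         sat = sat & c_sat
--     return sat
-- ===== SOURCE B (Python) =====
-- def isSat(formula, certificate):
--     index = {}
--     for i, c in enumerate(formula):
--         for l in c:
--             index.setdefault(l, []).append(i)
--     satisfied = set()
--     for l in certificate:
--         satisfied.update(index.get(l, []))
--     return len(satisfied) == len(formula)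
-- ===== Notes on version B (the rewrite author's own statement) =====
-- stated objective: faster
-- what changed: Inverts the traversal: one pass over the formula builds a literal-to-clause-index dict, then a pass over the certificate collects the set of satisfied clause indices and the result is len(satisfied)==len(formula), replacing the per-literal linear scan of the certificate.
import Mathlib
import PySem

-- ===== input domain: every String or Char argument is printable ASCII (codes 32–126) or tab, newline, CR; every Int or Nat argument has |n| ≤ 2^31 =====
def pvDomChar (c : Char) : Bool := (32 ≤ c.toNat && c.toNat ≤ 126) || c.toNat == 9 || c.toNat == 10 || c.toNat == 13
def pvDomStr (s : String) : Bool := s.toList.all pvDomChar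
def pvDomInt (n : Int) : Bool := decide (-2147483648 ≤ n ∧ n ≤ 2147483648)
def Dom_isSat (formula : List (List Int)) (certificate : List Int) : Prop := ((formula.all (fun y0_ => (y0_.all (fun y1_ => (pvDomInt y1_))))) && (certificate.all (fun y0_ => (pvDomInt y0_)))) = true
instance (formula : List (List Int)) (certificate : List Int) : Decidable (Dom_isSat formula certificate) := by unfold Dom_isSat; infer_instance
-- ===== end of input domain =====

-- B builds a literal→clause-indices dict in one pass, then collects the set of
-- satisfied clause indices from the certificate; A rescans the certificate per literal.

-- ===== PORT A =====
def isSat (formula : List (List Int)) (certificate : List Int) : Bool :=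
  formula.foldl
    (fun sat c =>
      sat && c.foldl (fun c_sat l => if certificate.contains l then true else c_sat) false)
    true

-- ===== PORT B =====
def isSat_alt (formula : List (List Int)) (certificate : List Int) : Bool :=
  let index : PySem.Dict Int (List Int) :=
    (PySem.List.enumerate formula).foldl
      (fun d p => p.2.foldl (fun d l => d.modify l [] (fun v => v ++ [p.1])) d)
      PySem.Dict.empty
  let satisfied : PySem.Set Int :=
    certificate.foldl (fun s l => PySem.Set.update s (index.getD l [])) PySem.Set.empty
  decide (satisfied.length = formula.length)

-- ===== PRECONDITION & SPEC =====
def Spec_isSat (formula : List (List Int)) (certificate : List Int) (out : Bool) : Prop := out = isSat_alt formula certificate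
instance (formula : List (List Int)) (certificate : List Int) (out : Bool) : Decidable (Spec_isSat formula certificate out) := by unfold Spec_isSat; infer_instance

-- ===== CLAIM (what is proved, stated in full; the proofs are below) =====
def Claim_equal_isSat : Prop := ∀ (formula : List (List Int)) (certificate : List Int), Dom_isSat formula certificate → Spec_isSat formula certificate (isSat formula certificate)

-- ===== LEMMAS AND PROOFS =====

-- A's inner loop computes any
theorem isSat_inner (cert : List Int) (c : List Int) (b : Bool) :
    c.foldl (fun c_sat l => if cert.contains l then true else c_sat) b
      = (b || c.any (fun l => cert.contains l)) := by
  induction c generalizing b with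
  | nil => simp
  | cons x xs ih =>
    simp only [List.foldl_cons, List.any_cons, ih]
    cases h : cert.contains x <;> simp_all

-- A computes all
theorem isSat_foldl_all (cert : List Int) (formula : List (List Int)) (b : Bool) :
    formula.foldl
      (fun sat c => sat && c.foldl (fun c_sat l => if cert.contains l then true else c_sat) false)
      b = (b && formula.all (fun c => c.any (fun l => cert.contains l))) := by
  induction formula generalizing b with
  | nil => simp
  | cons c cs ih =>
    rw [List.foldl_cons, ih, isSat_inner]
    simp [Bool.and_assoc]

theorem isSat_eq_all (formula : List (List Int)) (cert : List Int) :
    isSat formula cert = formula.all (fun c => c.any (fun l => cert.contains l)) := by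
  unfold isSat
  rw [isSat_foldl_all, Bool.true_and]

-- membership in the dict entry after folding one clause
theorem inner_getD (c : List Int) (j : Int) (d : PySem.Dict Int (List Int)) (l i : Int) :
    i ∈ (c.foldl (fun d x => d.modify x [] (fun v => v ++ [j])) d).getD l []
      ↔ i ∈ d.getD l [] ∨ (i = j ∧ l ∈ c) := by
  induction c generalizing d with
  | nil => simp
  | cons x xs ih =>
    simp only [List.foldl_cons, ih, List.mem_cons]
    rw [PySem.Dict.getD_modify]
    split_ifs with h
    · subst h
      simp only [List.mem_append, List.mem_singleton]
      tauto
    · tauto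

-- membership in the dict entry after folding the enumerated formula
theorem build_getD (pairs : List (Int × List Int)) (d : PySem.Dict Int (List Int)) (l i : Int) :
    i ∈ (pairs.foldl
          (fun d p => p.2.foldl (fun d x => d.modify x [] (fun v => v ++ [p.1])) d) d).getD l []
      ↔ i ∈ d.getD l [] ∨ ∃ p ∈ pairs, i = p.1 ∧ l ∈ p.2 := by
  induction pairs generalizing d with
  | nil => simp
  | cons p ps ih =>
    simp only [List.foldl_cons, ih, inner_getD, List.mem_cons]
    constructor
    · rintro ((h | h) | ⟨q, hq, h⟩)
      · exact Or.inl h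
      · exact Or.inr ⟨p, Or.inl rfl, h⟩
      · exact Or.inr ⟨q, Or.inr hq, h⟩
    · rintro (h | ⟨q, (rfl | hq), h⟩)
      · exact Or.inl (Or.inl h)
      · exact Or.inl (Or.inr h)
      · exact Or.inr ⟨q, hq, h⟩

-- membership in the satisfied set
theorem satisfied_mem (cert : List Int) (idx : Int → List Int) (s : PySem.Set Int) (i : Int) :
    i ∈ cert.foldl (fun s l => PySem.Set.update s (idx l)) s
      ↔ i ∈ s ∨ ∃ l ∈ cert, i ∈ idx l := by
  induction cert generalizing s with
  | nil => simp
  | cons x xs ih =>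
    simp only [List.foldl_cons, ih, PySem.Set.mem_update, List.mem_cons]
    constructor
    · rintro ((h | h) | ⟨l, hl, h⟩)
      · exact Or.inl h
      · exact Or.inr ⟨x, Or.inl rfl, h⟩
      · exact Or.inr ⟨l, Or.inr hl, h⟩
    · rintro (h | ⟨l, (rfl | hl), h⟩)
      · exact Or.inl (Or.inl h)
      · exact Or.inl (Or.inr h)
      · exact Or.inr ⟨l, hl, h⟩

theorem satisfied_nodup (cert : List Int) (idx : Int → List Int) (s : PySem.Set Int)
    (hs : s.Nodup) : (cert.foldl (fun s l => PySem.Set.update s (idx l)) s).Nodup := by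
  induction cert generalizing s with
  | nil => exact hs
  | cons x xs ih => exact ih _ (PySem.Set.nodup_update _ _ hs)

theorem isSat_spec_main (formula : List (List Int)) (certificate : List Int) :
    isSat formula certificate = isSat_alt formula certificate := by
  have halt : isSat_alt formula certificate
      = decide ((certificate.foldl
          (fun s l => PySem.Set.update s
            (((PySem.List.enumerate formula).foldl
                (fun d p => p.2.foldl (fun d x => d.modify x [] (fun v => v ++ [p.1])) d)
                PySem.Dict.empty).getD l []))
          PySem.Set.empty).length = formula.length) := rfl
  rw [isSat_eq_all, halt]
  set n := formula.length with hn
  set en := PySem.List.enumerate formula with hen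
  set S := certificate.foldl
      (fun s l => PySem.Set.update s
        ((en.foldl (fun d p => p.2.foldl (fun d x => d.modify x [] (fun v => v ++ [p.1])) d)
          PySem.Dict.empty).getD l [])) PySem.Set.empty with hS
  have hmemS : ∀ i, i ∈ S ↔ ∃ p ∈ en, i = p.1 ∧ ∃ l ∈ certificate, l ∈ p.2 := by
    intro i
    rw [hS, satisfied_mem]
    constructor
    · rintro (h | ⟨l, hl, h⟩)
      · exact absurd h (List.not_mem_nil)
      · rw [build_getD] at h
        rcases h with h | ⟨p, hp, rfl, hlp⟩
        · simp [PySem.Dict.getD_empty] at h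
        · exact ⟨p, hp, rfl, l, hl, hlp⟩
    · rintro ⟨p, hp, rfl, l, hl, hlp⟩
      exact Or.inr ⟨l, hl, (build_getD en PySem.Dict.empty l p.1).2 (Or.inr ⟨p, hp, rfl, hlp⟩)⟩
  set L := (en.filter (fun p => p.2.any (fun l => certificate.contains l))).map Prod.fst with hL
  have hmemL : ∀ i, i ∈ L ↔ ∃ p ∈ en, i = p.1 ∧ ∃ l ∈ certificate, l ∈ p.2 := by
    intro i
    simp only [hL, List.mem_map, List.mem_filter, List.any_eq_true]
    constructor
    · rintro ⟨p, ⟨hp, hsat⟩, rfl⟩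
      rcases hsat with ⟨l, hlp, hl⟩
      exact ⟨p, hp, rfl, l, by simpa using hl, hlp⟩
    · rintro ⟨p, hp, rfl, l, hl, hlp⟩
      exact ⟨p, ⟨hp, ⟨l, hlp, by simpa using hl⟩⟩, rfl⟩
  have hndS : S.Nodup := satisfied_nodup _ _ _ List.nodup_nil
  have hndL : L.Nodup := by
    have hpl : (en.filter (fun p => p.2.any (fun l => certificate.contains l))).Pairwise
        (fun p q => p.1 < q.1) :=
      List.Pairwise.filter _ (PySem.List.pairwise_lt_enumerate _ _)
    rw [hL, List.Nodup]
    exact (List.pairwise_map.mpr (hpl.imp (fun h => ne_of_lt h)))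
  have hlen : S.length = L.length :=
    ((List.perm_ext_iff_of_nodup hndS hndL).2 (fun i => (hmemS i).trans (hmemL i).symm)).length_eq
  have hlen_en : en.length = n := by rw [hen, PySem.List.length_enumerate, hn]
  have hLn : (L.length = n) ↔ (formula.all (fun c => c.any (fun l => certificate.contains l)) = true) := by
    rw [hL, List.length_map, ← hlen_en, List.length_filter_eq_length_iff]
    constructor
    · intro h
      rw [List.all_eq_true]
      intro c hc
      rcases List.mem_iff_getElem.mp hc with ⟨k, hk, rfl⟩
      exact h _ ((PySem.List.mem_enumerate_iff formula 0 ((0 + (k : Int)), formula[k])).2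
        ⟨k, hk, rfl⟩)
    · intro h p hp
      rw [hen, PySem.List.mem_enumerate_iff] at hp
      rcases hp with ⟨k, hk, rfl⟩
      exact (List.all_eq_true.mp h) _ (List.getElem_mem hk)
  rw [hlen]
  rcases hb : formula.all (fun c => c.any (fun l => certificate.contains l)) with _ | _
  · symm
    rw [decide_eq_false_iff_not]
    intro hc
    rw [hLn.1 hc] at hb
    exact absurd hb (by decide)
  · symm
    rw [decide_eq_true_eq]
    exact hLn.2 hb

-- ===== VERDICT (by name: the statement is the Claim_ definition above) =====
theorem isSat_spec : Claim_equal_isSat := by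
  intro formula certificate _
  unfold Spec_isSat
  exact isSat_spec_main formula certificate
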